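-- pv_equiv track=rewrite | github.com/cc13ny/all-in | comp/microsoft/008_new_string_without_3_same_cons_letters_by_deletion.py | new_str
-- ===== SOURCE A (Python) =====
-- def new_str(s):
--     if not s or len(s) < 3:
--         return s
--     res = s[0]
--     cnt = 1
--     i = 1
--     while i < len(s):
--         if s[i] == res[-1]:
--             cnt += 1
--         else:
--             cnt = 1
--         if cnt < 3:
--             res += s[i]
--         i += 1
--     return res
-- ===== SOURCE B (Python) =====
-- def new_str(s):
--     # Stateless window filter: a character is deleted exactly when its two
--     # predecessors in the ORIGINAL string equal it (deletions only shorten a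
--     # run, so the last kept char before position i is always s[i-1]).
--     return ''.join(c for i, c in enumerate(s) if i < 2 or c != s[i - 1] or c != s[i - 2])
-- ===== Notes on version B (the rewrite author's own statement) =====
-- stated objective: idiomatic
-- what changed: Replaces A's stateful loop (run counter checked against the last kept character, string built by repeated concatenation) with a stateless index-window filter joined once: keep s[i] iff i<2 or s[i] differs from s[i-1] or from s[i-2] in the original string; correct because deletions only shorten a run, so A's counter equals the original run length and A drops exactly the chars whose two original predecessors equal them.
import Mathlib
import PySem

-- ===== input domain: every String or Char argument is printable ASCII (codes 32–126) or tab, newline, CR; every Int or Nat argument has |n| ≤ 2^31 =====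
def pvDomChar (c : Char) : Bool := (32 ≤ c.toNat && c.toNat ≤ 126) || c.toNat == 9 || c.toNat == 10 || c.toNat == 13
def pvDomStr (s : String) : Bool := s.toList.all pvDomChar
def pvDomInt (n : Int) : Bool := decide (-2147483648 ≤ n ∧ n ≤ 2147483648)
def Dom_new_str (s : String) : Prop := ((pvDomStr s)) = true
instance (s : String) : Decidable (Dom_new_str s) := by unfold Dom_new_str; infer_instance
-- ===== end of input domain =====

-- B replaces A's stateful loop (run counter against the last kept char) by a stateless
-- filter on original indices: keep s[i] iff i < 2 or s[i] ≠ s[i-1] or s[i] ≠ s[i-2] (idiomatic).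

-- ===== PORT A =====
-- the while loop, transliterated as structural recursion over the remaining chars
-- with the same state (res, cnt); res[-1] is res.getLastD (res is never empty here,
-- so the default is never consulted and the Python never raises).
def newStrGo : List Char → List Char → Nat → List Char
  | [], res, _ => res
  | c :: cs, res, cnt =>
      let cnt' := if c == res.getLastD ' ' then cnt + 1 else 1
      if cnt' < 3 then newStrGo cs (res ++ [c]) cnt' else newStrGo cs res cnt'

def new_str (s : String) : String :=
  if s.toList.length < 3 then s
  else
    match s.toList with
    | [] => s
    | c :: cs => String.ofList (newStrGo cs [c] 1)

-- ===== PORT B =====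
-- ''.join(c for i, c in enumerate(s) if i < 2 or c != s[i-1] or c != s[i-2])
-- s[i-1] / s[i-2] are only reached when i >= 2 (Python's short-circuit 'or'),
-- so those indices are always in range and pyGetD's default is never consulted.
def new_str_alt (s : String) : String :=
  String.ofList ((PySem.List.enumerate s.toList).filterMap
    (fun ic =>
      if ic.1 < 2 || !(ic.2 == PySem.List.pyGetD s.toList (ic.1 - 1) ' ')
          || !(ic.2 == PySem.List.pyGetD s.toList (ic.1 - 2) ' ')
      then some ic.2 else none))

-- ===== PRECONDITION & SPEC =====
def Spec_new_str (s : String) (out : String) : Prop := out = new_str_alt s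
instance (s : String) (out : String) : Decidable (Spec_new_str s out) := by unfold Spec_new_str; infer_instance

-- ===== CLAIM =====
def Claim_equal_new_str : Prop := ∀ (s : String), Dom_new_str s → Spec_new_str s (new_str s)

-- ===== LEMMAS AND PROOFS =====

-- canonical middle form: process cs with the two previous ORIGINAL chars (p2, p1);
-- drop c iff c = p1 = p2, and slide the window regardless of keeping.
def keepGo : List Char → Char → Char → List Char
  | [], _, _ => []
  | c :: cs, p2, p1 => if c = p1 ∧ c = p2 then keepGo cs p1 c else c :: keepGo cs p1 c

theorem getLastD_append_singleton (res : List Char) (c d : Char) :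
    (res ++ [c]).getLastD d = c := by
  induction res generalizing d with
  | nil => rfl
  | cons a rs ih => rw [List.cons_append, List.getLastD_cons, ih]
theorem aGo_keep (cs : List Char) : ∀ (res : List Char) (p2 p1 : Char) (cnt : Nat),
    res.getLastD ' ' = p1 → 1 ≤ cnt → (2 ≤ cnt ↔ p2 = p1) →
    newStrGo cs res cnt = res ++ keepGo cs p2 p1 := by
  induction cs with
  | nil => intro res p2 p1 cnt _ _ _; simp [newStrGo, keepGo]
  | cons c cs ih =>
    intro res p2 p1 cnt hlast hcnt hiff
    by_cases hc : c = p1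
    · have hb : (c == res.getLastD ' ') = true := by rw [hlast]; simp [hc]
      by_cases h2 : 2 ≤ cnt
      · have hp2 : p2 = p1 := hiff.mp h2
        simp only [newStrGo, hb, if_true]
        rw [if_neg (by omega), keepGo, if_pos ⟨hc, hc.trans hp2.symm⟩]
        exact ih res p1 c (cnt + 1) (hlast.trans hc.symm) (by omega) ⟨fun _ => hc.symm, fun _ => by omega⟩
      · have hcnt1 : cnt = 1 := by omega
        subst hcnt1
        have hp2 : p2 ≠ p1 := fun h => h2 (hiff.mpr h)
        simp only [newStrGo, hb, if_true]
        rw [if_pos (by omega), keepGo, if_neg (by rintro ⟨_, h⟩; exact hp2 (h.symm.trans hc))]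
        rw [ih (res ++ [c]) p1 c 2 (getLastD_append_singleton ..) (by omega)
          ⟨fun _ => hc.symm, fun _ => by omega⟩]
        simp
    · have hb : (c == res.getLastD ' ') = false := by rw [hlast]; simp [hc]
      simp only [newStrGo, hb, Bool.false_eq_true, if_false]
      rw [if_pos (by omega), keepGo, if_neg (by rintro ⟨h, _⟩; exact hc h)]
      rw [ih (res ++ [c]) p1 c 1 (getLastD_append_singleton ..) (le_refl 1)
        ⟨fun h => by omega, fun h => absurd h.symm hc⟩]
      simp

theorem bFilter (l : List Char) : ∀ (n k : Nat), 2 ≤ k → l.length - k = n →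
    (PySem.List.enumerate (l.drop k) (k : Int)).filterMap
      (fun ic =>
        if ic.1 < 2 || !(ic.2 == PySem.List.pyGetD l (ic.1 - 1) ' ')
            || !(ic.2 == PySem.List.pyGetD l (ic.1 - 2) ' ')
        then some ic.2 else none)
      = keepGo (l.drop k) (l.getD (k - 2) ' ') (l.getD (k - 1) ' ') := by
  intro n
  induction n with
  | zero =>
    intro k _ hn
    have h : l.drop k = [] := List.drop_eq_nil_of_le (by omega)
    simp [h, keepGo]
  | succ n ih =>
    intro k hk hn
    have hlt : k < l.length := by omega
    rw [List.drop_eq_getElem_cons hlt, PySem.List.enumerate_cons, List.filterMap_cons]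
    have h1 : ((k : Int) - 1) = ((k - 1 : Nat) : Int) := by omega
    have h2 : ((k : Int) - 2) = ((k - 2 : Nat) : Int) := by omega
    have hrec : ((k : Int) + 1) = ((k + 1 : Nat) : Int) := by push_cast; ring
    have hklt : ¬ ((k : Int) < 2) := by omega
    simp only [h1, h2, hrec, PySem.List.pyGetD_natCast, decide_eq_false hklt, Bool.false_or,
      List.getD_eq_getElem?_getD]
    rw [ih (k + 1) (by omega) (by omega)]
    have e1 : k + 1 - 1 = k := by omega
    have e2 : k + 1 - 2 = k - 1 := by omega
    simp only [List.getD_eq_getElem?_getD, e1, e2, List.getElem?_eq_getElem hlt,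
      Option.getD_some, keepGo]
    by_cases hA : l[k] = l[k - 1]?.getD ' ' <;> by_cases hB : l[k] = l[k - 2]?.getD ' '
    · have hP : l[k - 1]?.getD ' ' = l[k - 2]?.getD ' ' := hA.symm.trans hB
      simp [hA, hP]
    · have b2 : (l[k] == l[k - 2]?.getD ' ') = false := by simp [hB]
      simp [b2, hB]
    · have b1 : (l[k] == l[k - 1]?.getD ' ') = false := by simp [hA]
      simp [b1, hA]
    · have b1 : (l[k] == l[k - 1]?.getD ' ') = false := by simp [hA]
      simp [b1, hA]

-- ===== VERDICT =====
theorem new_str_spec : Claim_equal_new_str := by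
  intro s _
  unfold Spec_new_str new_str new_str_alt
  rcases hl : s.toList with _ | ⟨c0, _ | ⟨c1, _ | ⟨c2, rest⟩⟩⟩
  · rw [if_pos (by simp)]
    simp only [PySem.List.enumerate_nil, List.filterMap_nil]
    rw [← hl, String.ofList_toList]
  · rw [if_pos (by simp)]
    simp only [PySem.List.enumerate_cons, PySem.List.enumerate_nil,
      List.filterMap_cons, List.filterMap_nil]
    norm_num
    rw [← hl, String.ofList_toList]
  · rw [if_pos (by simp)]
    simp only [PySem.List.enumerate_cons, PySem.List.enumerate_nil,
      List.filterMap_cons, List.filterMap_nil]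
    norm_num
    rw [← hl, String.ofList_toList]
  · rw [if_neg (by simp)]
    -- B side: peel the first two (always kept) entries, then bFilter at k = 2
    have hB : (PySem.List.enumerate (c0 :: c1 :: c2 :: rest) 0).filterMap
        (fun ic =>
          if ic.1 < 2 || !(ic.2 == PySem.List.pyGetD (c0 :: c1 :: c2 :: rest) (ic.1 - 1) ' ')
              || !(ic.2 == PySem.List.pyGetD (c0 :: c1 :: c2 :: rest) (ic.1 - 2) ' ')
          then some ic.2 else none)
        = c0 :: c1 :: keepGo (c2 :: rest) c0 c1 := by
      rw [PySem.List.enumerate_cons, PySem.List.enumerate_cons,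
        List.filterMap_cons, List.filterMap_cons]
      have h2 := bFilter (c0 :: c1 :: c2 :: rest) (rest.length + 1) 2 (le_refl 2) (by simp)
      rw [show ((c0 :: c1 :: c2 :: rest).drop 2) = c2 :: rest from rfl] at h2
      rw [show ((0 : Int) + 1 + 1) = ((2 : Nat) : Int) from by norm_num, h2]
      norm_num
    -- A side: start the invariant at res = [c0], cnt = 1, with a dummy p2 ≠ c0
    rw [hB]
    have hp2 : (if c0 = 'a' then 'b' else 'a') ≠ c0 := by
      by_cases hc : c0 = 'a' <;> simp [hc]
      exact fun h => hc h.symm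
    show String.ofList (newStrGo (c1 :: c2 :: rest) [c0] 1)
        = String.ofList (c0 :: c1 :: keepGo (c2 :: rest) c0 c1)
    rw [aGo_keep (c1 :: c2 :: rest) [c0] (if c0 = 'a' then 'b' else 'a') c0 1 rfl (le_refl 1)
      ⟨fun h => by omega, fun h => absurd h hp2⟩]
    rw [keepGo, if_neg (by rintro ⟨h1, h2⟩; exact hp2 (h2.symm.trans h1))]
    rfl
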